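-- pv_equiv track=rewrite | github.com/msvosobishops/softdev-25-26 | p2lab06/ZhuAlice_7085582_trivia_game.py | sort_questions
-- ===== SOURCE A (Python) =====
-- def sort_questions(results:list) -> tuple:
--     '''sort the questions from the API into easy, medium, and hard, return these lists'''
--     easy_questions = []
--     medium_questions = []
--     hard_questions = []
--
--     #sort questions into easy, medium, and hard
--     for question in results: # go through each question
--         if question["difficulty"] == "easy":
--             easy_questions.append(question)
--         elif question["difficulty"] == "medium":
--             medium_questions.append(question)
--         else:
--             hard_questions.append(question)
--
--     #  return three lists
--     return easy_questions, medium_questions, hard_questions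
-- ===== SOURCE B (Python) =====
-- def sort_questions(results: list) -> tuple:
--     '''sort the questions from the API into easy, medium, and hard, return these lists'''
--     rank = {"easy": 0, "medium": 1}
--     ordered = sorted(results, key=lambda q: rank.get(q["difficulty"], 2))
--     ranks = [rank.get(q["difficulty"], 2) for q in ordered]
--     i = ranks.count(0)
--     j = i + ranks.count(1)
--     return ordered[:i], ordered[i:j], ordered[j:]
-- ===== Notes on version B (the rewrite author's own statement) =====
-- stated objective: alternative
-- what changed: A's single if/elif/else partitioning pass is replaced by a stable sort on a numeric rank (easy=0, medium=1, other=2) followed by splitting the sorted list at the bucket-count boundaries; stability preserves A's per-bucket order.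
import Mathlib
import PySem

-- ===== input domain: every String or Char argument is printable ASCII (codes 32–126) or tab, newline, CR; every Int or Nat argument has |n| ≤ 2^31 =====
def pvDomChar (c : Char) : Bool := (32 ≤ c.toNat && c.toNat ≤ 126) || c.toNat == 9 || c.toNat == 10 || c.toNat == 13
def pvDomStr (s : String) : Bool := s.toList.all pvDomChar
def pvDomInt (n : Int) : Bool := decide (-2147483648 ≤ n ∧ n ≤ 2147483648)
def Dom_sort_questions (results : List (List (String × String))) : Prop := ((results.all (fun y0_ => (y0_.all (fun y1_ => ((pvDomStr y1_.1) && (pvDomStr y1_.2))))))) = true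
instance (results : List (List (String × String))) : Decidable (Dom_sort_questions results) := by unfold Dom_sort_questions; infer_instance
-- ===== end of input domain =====

-- B replaces A's single if/elif/else partitioning pass by a stable sort on a numeric rank
-- followed by splitting the sorted list at the bucket-count boundaries (alternative algorithm).


-- ===== PORT A =====
-- question["difficulty"]: first-match lookup in the association list; the "" default is the
-- total form and is exact under Pre_sort_questions (key present; Python raises KeyError otherwise)
def pvDifficulty (q : List (String × String)) : String :=
  (((q.find? (fun p => p.1 == "difficulty")).map (·.2)).getD "")

def sort_questions_loop :
    (List (List (String × String))) × (List (List (String × String))) × (List (List (String × String))) →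
    List (List (String × String)) →
    (List (List (String × String))) × (List (List (String × String))) × (List (List (String × String)))
  | acc, [] => acc
  | (e, m, h), q :: rest =>
    if pvDifficulty q = "easy" then sort_questions_loop (e ++ [q], m, h) rest
    else if pvDifficulty q = "medium" then sort_questions_loop (e, m ++ [q], h) rest
    else sort_questions_loop (e, m, h ++ [q]) rest

def sort_questions (results : List (List (String × String))) : (List (List (String × String))) × (List (List (String × String))) × (List (List (String × String))) :=
  sort_questions_loop ([], [], []) results

-- ===== PORT B =====
-- rank = {"easy": 0, "medium": 1}
def pvRankDict : PySem.Dict String Int := PySem.Dict.ofList [("easy", 0), ("medium", 1)]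

-- rank.get(q["difficulty"], 2)
def pvRankOf (q : List (String × String)) : Int := pvRankDict.getD (pvDifficulty q) 2

def sort_questions_alt (results : List (List (String × String))) : (List (List (String × String))) × (List (List (String × String))) × (List (List (String × String))) :=
  let ordered := PySem.List.sorted results pvRankOf
  let ranks := ordered.map pvRankOf
  let i := PySem.List.count ranks 0
  let j := i + PySem.List.count ranks 1
  (PySem.List.slice ordered none (some (i : Int)),
   PySem.List.slice ordered (some (i : Int)) (some (j : Int)),
   PySem.List.slice ordered (some (j : Int)) none)

-- ===== PRECONDITION & SPEC =====
-- Pre_ excludes questions without a "difficulty" key, on which Python A raises KeyError.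
def Pre_sort_questions (results : List (List (String × String))) : Prop :=
  results.all (fun q => q.any (fun p => p.1 == "difficulty")) = true
instance (results : List (List (String × String))) : Decidable (Pre_sort_questions results) := by unfold Pre_sort_questions; infer_instance

def pvWitness_sort_questions : (List (List (String × String))) :=
  [[("difficulty", "easy"), ("question", "2+2?")],
   [("difficulty", "hard")],
   [("difficulty", "medium"), ("question", "sqrt 2?")]]

def Spec_sort_questions (results : List (List (String × String))) (out : (List (List (String × String))) × (List (List (String × String))) × (List (List (String × String)))) : Prop := out = sort_questions_alt results
instance (results : List (List (String × String))) (out : (List (List (String × String))) × (List (List (String × String))) × (List (List (String × String)))) : Decidable (Spec_sort_questions results out) := by unfold Spec_sort_questions; infer_instance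

-- ===== CLAIM (what is proved, stated in full; the proofs are below) =====
def Claim_equal_sort_questions : Prop := ∀ (results : List (List (String × String))), Dom_sort_questions results → Pre_sort_questions results → Spec_sort_questions results (sort_questions results)

-- ===== LEMMAS AND PROOFS =====
-- the three buckets as filters over the input (proof vocabulary shared by both sides)
def pvBucket (r : Int) (l : List (List (String × String))) : List (List (String × String)) :=
  l.filter (fun q => decide (pvRankOf q = r))

theorem pvRankOf_eq (q : List (String × String)) :
    pvRankOf q = if pvDifficulty q = "easy" then 0 else if pvDifficulty q = "medium" then 1 else 2 := by
  have hD : pvRankDict = PySem.Dict.mk [("easy", 0), ("medium", 1)] := by decide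
  unfold pvRankOf
  rw [hD]
  by_cases he : pvDifficulty q = "easy"
  · simp [PySem.Dict.getD, PySem.Dict.get?_mk_cons, he]
  · by_cases hm : pvDifficulty q = "medium"
    · simp [PySem.Dict.getD, PySem.Dict.get?, List.find?, hm]
    · have h1 : ("easy" == pvDifficulty q) = false := by
        simp [beq_eq_false_iff_ne]; exact fun h => he h.symm
      have h2 : ("medium" == pvDifficulty q) = false := by
        simp [beq_eq_false_iff_ne]; exact fun h => hm h.symm
      simp [PySem.Dict.getD, PySem.Dict.get?, List.find?, h1, h2, he, hm]

theorem pvRankOf_cases (q : List (String × String)) :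
    pvRankOf q = 0 ∨ pvRankOf q = 1 ∨ pvRankOf q = 2 := by
  rw [pvRankOf_eq]; split_ifs <;> simp

theorem insertBy_append_left {α : Type} (b : α → α → Bool) (x : α) (ys zs : List α)
    (h : ∀ y ∈ ys, b x y = false) :
    PySem.List.insertBy b x (ys ++ zs) = ys ++ PySem.List.insertBy b x zs := by
  induction ys with
  | nil => rfl
  | cons y t ih =>
    have hy := h y (by simp)
    simp only [List.cons_append, PySem.List.insertBy, hy]
    simp [ih (fun y hy => h y (by simp [hy]))]

theorem insertBy_cons_of_before {α : Type} (b : α → α → Bool) (x y : α) (ys : List α)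
    (h : b x y = true) : PySem.List.insertBy b x (y :: ys) = x :: y :: ys := by
  simp [PySem.List.insertBy, h]

theorem mem_bucket_rank {r : Int} {q : List (String × String)} {l : List (List (String × String))}
    (h : q ∈ pvBucket r l) : pvRankOf q = r := by
  unfold pvBucket at h
  simpa using (List.of_mem_filter h)

theorem bucket_append (r : Int) (l : List (List (String × String))) (x : List (String × String)) :
    pvBucket r (l ++ [x]) = pvBucket r l ++ (if pvRankOf x = r then [x] else []) := by
  unfold pvBucket
  simp [List.filter_append]
  split_ifs <;> simp_all

-- the stable sort by rank IS the three buckets in order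
theorem sorted_eq_buckets (l : List (List (String × String))) :
    PySem.List.sorted l pvRankOf = pvBucket 0 l ++ pvBucket 1 l ++ pvBucket 2 l := by
  induction l using List.reverseRecOn with
  | nil => rfl
  | append_singleton l x ih =>
    rw [PySem.List.sorted_eq_foldl_insertBy] at *
    rw [List.foldl_append, ih]
    simp only [List.foldl_cons, List.foldl_nil]
    rw [bucket_append, bucket_append, bucket_append]
    rcases pvRankOf_cases x with h | h | h
    · -- rank 0: insert right after bucket 0
      conv_lhs => rw [List.append_assoc]
      rw [insertBy_append_left _ _ (pvBucket 0 l) _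
          (fun y hy => by simp [h, mem_bucket_rank hy])]
      rcases he : pvBucket 1 l ++ pvBucket 2 l with _ | ⟨y, t⟩
      · rcases List.append_eq_nil_iff.1 he with ⟨h1, h2⟩
        simp [h1, h2, h, PySem.List.insertBy]
      · have hy : pvRankOf y = 1 ∨ pvRankOf y = 2 := by
          rcases (List.mem_append.1 (he ▸ List.mem_cons_self)) with hm | hm
          · exact Or.inl (mem_bucket_rank hm)
          · exact Or.inr (mem_bucket_rank hm)
        rw [insertBy_cons_of_before _ _ _ _
            (by rcases hy with hy | hy <;> simp [h, hy])]
        simp [h, ← he]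
    · -- rank 1: insert after buckets 0 and 1
      rw [insertBy_append_left _ _ (pvBucket 0 l ++ pvBucket 1 l) _
          (fun y hy => by
            rcases List.mem_append.1 hy with hm | hm
            · have := mem_bucket_rank hm; simp [h, this]
            · have := mem_bucket_rank hm; simp [h, this])]
      rcases he : pvBucket 2 l with _ | ⟨y, t⟩
      · simp [h, PySem.List.insertBy]
      · have hy : pvRankOf y = 2 := mem_bucket_rank (he ▸ List.mem_cons_self)
        rw [insertBy_cons_of_before _ _ _ _ (by simp [h, hy])]
        simp [h, ← he]
    · -- rank 2: goes at the very end
      rw [PySem.List.insertBy_of_forall_not_before _ _ _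
          (fun y hy => by
            rcases List.mem_append.1 hy with hm | hm
            · rcases List.mem_append.1 hm with hm2 | hm2
              · have := mem_bucket_rank hm2; simp [h, this]
              · have := mem_bucket_rank hm2; simp [h, this]
            · have := mem_bucket_rank hm; simp [h, this])]
      simp [h]

-- A's loop computes the same three buckets
theorem sort_questions_loop_eq (l : List (List (String × String)))
    (e m h : List (List (String × String))) :
    sort_questions_loop (e, m, h) l = (e ++ pvBucket 0 l, m ++ pvBucket 1 l, h ++ pvBucket 2 l) := by
  induction l generalizing e m h with
  | nil => simp [sort_questions_loop, pvBucket]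
  | cons q rest ih =>
    by_cases he : pvDifficulty q = "easy"
    · simp [sort_questions_loop, he, ih, pvBucket, pvRankOf_eq]
    · by_cases hm : pvDifficulty q = "medium"
      · simp [sort_questions_loop, hm, ih, pvBucket, pvRankOf_eq]
      · simp [sort_questions_loop, he, hm, ih, pvBucket, pvRankOf_eq]

theorem count_map_bucket (r s : Int) (l : List (List (String × String))) :
    List.count r ((pvBucket s l).map pvRankOf) = if r = s then (pvBucket s l).length else 0 := by
  split_ifs with h
  · subst h
    rw [List.count_eq_length.2, List.length_map]
    intro b hb
    rcases List.mem_map.1 hb with ⟨q, hq, rfl⟩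
    exact (mem_bucket_rank hq).symm
  · rw [List.count_eq_zero.2]
    intro hb
    rcases List.mem_map.1 hb with ⟨q, hq, h'⟩
    exact h (h'.symm.trans (mem_bucket_rank hq))

-- ===== VERDICT (by name: the statement is the Claim_ definition above) =====
theorem sort_questions_spec : Claim_equal_sort_questions := by
  intro results _ _
  unfold Spec_sort_questions sort_questions sort_questions_alt
  rw [sort_questions_loop_eq]
  simp only [List.nil_append]
  rw [sorted_eq_buckets]
  set F0 := pvBucket 0 results with hF0
  set F1 := pvBucket 1 results with hF1
  set F2 := pvBucket 2 results with hF2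
  have hi : PySem.List.count ((F0 ++ F1 ++ F2).map pvRankOf) 0 = F0.length := by
    rw [PySem.List.count_eq]
    simp only [List.map_append, List.count_append, hF0, hF1, hF2, count_map_bucket]
    norm_num
  have hj : PySem.List.count ((F0 ++ F1 ++ F2).map pvRankOf) 1 = F1.length := by
    rw [PySem.List.count_eq]
    simp only [List.map_append, List.count_append, hF0, hF1, hF2, count_map_bucket]
    norm_num
  simp only [hi, hj]
  refine Prod.ext ?_ (Prod.ext ?_ ?_)
  · show F0 = PySem.List.slice (F0 ++ F1 ++ F2) none (some ((F0.length : Nat) : Int))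
    rw [PySem.List.slice_to_natCast, List.append_assoc, List.take_left]
  · show F1 = PySem.List.slice (F0 ++ F1 ++ F2) (some ((F0.length : Nat) : Int)) (some ((F0.length + F1.length : Nat) : Int))
    rw [PySem.List.slice_natCast, List.append_assoc, List.drop_left, Nat.add_sub_cancel_left, List.take_left]
  · show F2 = PySem.List.slice (F0 ++ F1 ++ F2) (some ((F0.length + F1.length : Nat) : Int)) none
    rw [PySem.List.slice_from_natCast, ← List.length_append, List.drop_left]
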